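-- pv_equiv track=rewrite | github.com/KeivanJamali/Pure-Python | P0/01-Basic_Programming_Class/005-Maximum Subset Sum.py | mat_beauty
-- ===== SOURCE A (Python) =====
-- def mat_beauty(matrix: list) -> list:
--     temp = matrix.copy()
--     for i in range(0, len(temp) - 1, 2):
--         if temp[i] >= 0 and temp[i + 1] >= 0:
--             matrix[i] = temp[i] + temp[i + 1]
--             matrix[i + 1] = 0
--         if temp[i] <= 0 and temp[i + 1] <= 0:
--             matrix[i] = temp[i] + temp[i + 1]
--             matrix[i + 1] = 0
--     try:
--         while True:
--             matrix.remove(0)         #Keip S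
--     except:
--         return matrix
-- ===== SOURCE B (Python) =====
-- def mat_beauty(matrix: list) -> list:
--     res = []
--     rest = matrix
--     while len(rest) >= 2:
--         a, b, rest = rest[0], rest[1], rest[2:]
--         if (a > 0 and b < 0) or (a < 0 and b > 0):
--             res += [a, b]
--         elif a + b != 0:
--             res.append(a + b)
--     if rest and rest[0] != 0:
--         res.append(rest[0])
--     matrix[:] = res
--     return matrix
-- ===== Notes on version B (the rewrite author's own statement) =====
-- stated objective: simpler
-- what changed: A pair-merges same-sign neighbours in place leaving 0 markers and then repeatedly calls matrix.remove(0); B builds the final list directly in one pass over the pairs (appending the merged sum only when nonzero, or both elements of a mixed-sign pair), appends the nonzero odd leftover, and assigns back with matrix[:] = res, never creating or rescanning for zero markers.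
import Mathlib
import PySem

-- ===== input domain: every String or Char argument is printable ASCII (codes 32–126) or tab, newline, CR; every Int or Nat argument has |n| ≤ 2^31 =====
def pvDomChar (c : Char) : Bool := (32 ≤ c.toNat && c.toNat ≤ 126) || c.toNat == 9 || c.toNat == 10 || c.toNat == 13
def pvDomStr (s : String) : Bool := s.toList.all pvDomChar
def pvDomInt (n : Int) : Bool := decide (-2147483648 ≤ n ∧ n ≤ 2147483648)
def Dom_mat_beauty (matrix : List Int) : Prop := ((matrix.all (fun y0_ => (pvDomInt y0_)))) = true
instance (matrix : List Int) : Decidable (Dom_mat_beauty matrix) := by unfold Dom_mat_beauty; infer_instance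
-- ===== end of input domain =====

-- B replaces A's two phases (pair-merge leaving 0 markers, then repeated remove(0)) with one
-- direct pass that never writes markers; equivalence is about the returned list (both Pythons
-- leave `matrix` holding exactly the returned elements).

-- ===== PORT A =====
-- for i in range(0, len(temp)-1, 2): the two ifs mutate matrix at i, i+1 reading from temp.
-- Ported as recursion on the index i (step 2, guard i+1 < len); indices are always in range,
-- so temp[i] is List.getD and assignment is List.set (exact here).
def matLoopA (temp : List Int) (m : List Int) (i : Nat) : List Int :=
  if i + 1 < temp.length then
    let a := temp.getD i 0
    let b := temp.getD (i + 1) 0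
    let m1 := if 0 ≤ a ∧ 0 ≤ b then (m.set i (a + b)).set (i + 1) 0 else m
    let m2 := if a ≤ 0 ∧ b ≤ 0 then (m1.set i (a + b)).set (i + 1) 0 else m1
    matLoopA temp m2 (i + 2)
  else m
termination_by temp.length - i

-- while True: matrix.remove(0)  — until ValueError (remove? = none)
def removeZerosA (m : List Int) : List Int :=
  match h : PySem.List.remove? m 0 with
  | some m2 => removeZerosA m2
  | none => m
termination_by m.length
decreasing_by
  have hmem : (0 : Int) ∈ m := by
    by_contra hc
    simp [(PySem.List.remove?_eq_none_iff _ _).mpr hc] at h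
  rw [PySem.List.remove?_eq_some_erase m 0 hmem] at h
  cases h
  have h1 := List.length_erase_of_mem hmem
  have h2 : 0 < m.length := List.length_pos_of_mem hmem
  omega

def mat_beauty (matrix : List Int) : List Int :=
  removeZerosA (matLoopA matrix matrix 0)

-- ===== PORT B =====
-- one pass over pairs, accumulating the final elements directly (Source B's while-loop on rest)
def bLoopAlt (res : List Int) (rest : List Int) : List Int :=
  match rest with
  | a :: b :: rest' =>
    if (0 < a ∧ b < 0) ∨ (a < 0 ∧ 0 < b) then bLoopAlt (res ++ [a, b]) rest'
    else if a + b ≠ 0 then bLoopAlt (res ++ [a + b]) rest'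
    else bLoopAlt res rest'
  | [x] => if x ≠ 0 then res ++ [x] else res
  | [] => res

def mat_beauty_alt (matrix : List Int) : List Int := bLoopAlt [] matrix

-- ===== PRECONDITION & SPEC =====
def Spec_mat_beauty (matrix : List Int) (out : List Int) : Prop := out = mat_beauty_alt matrix
instance (matrix : List Int) (out : List Int) : Decidable (Spec_mat_beauty matrix out) := by unfold Spec_mat_beauty; infer_instance

-- ===== CLAIM (what is proved, stated in full; the proofs are below) =====
def Claim_equal_mat_beauty : Prop := ∀ (matrix : List Int), Dom_mat_beauty matrix → Spec_mat_beauty matrix (mat_beauty matrix)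

-- ===== LEMMAS AND PROOFS =====

-- what A's pairing loop leaves in one pair slot (the two ifs collapse to one condition:
-- when both fire, they write the same values twice)
def pairStep (a b : Int) : List Int :=
  if (0 ≤ a ∧ 0 ≤ b) ∨ (a ≤ 0 ∧ b ≤ 0) then [a + b, 0] else [a, b]

-- structural characterisation of A's pairing loop
def gPair : List Int → List Int
  | a :: b :: rest => pairStep a b ++ gPair rest
  | xs => xs

theorem pairStep_eq_merge (a b : Int) (h : (0 ≤ a ∧ 0 ≤ b) ∨ (a ≤ 0 ∧ b ≤ 0)) :
    pairStep a b = [a + b, 0] := if_pos h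

theorem pairStep_eq_keep (a b : Int) (h : ¬ ((0 ≤ a ∧ 0 ≤ b) ∨ (a ≤ 0 ∧ b ≤ 0))) :
    pairStep a b = [a, b] := if_neg h

theorem set2_append (pre t : List Int) (x y v w : Int) :
    ((pre ++ x :: y :: t).set pre.length v).set (pre.length + 1) w = pre ++ v :: w :: t := by
  induction pre with
  | nil => rfl
  | cons p ps ih => simpa using ih

theorem drop_pair (temp : List Int) (i : Nat) (h : i + 1 < temp.length) :
    temp.drop i = temp.getD i 0 :: temp.getD (i + 1) 0 :: temp.drop (i + 2) := by
  have h1 : i < temp.length := by omega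
  rw [List.drop_eq_getElem_cons h1, List.drop_eq_getElem_cons h,
    List.getD_eq_getElem _ _ h1, List.getD_eq_getElem _ _ h]

theorem matLoopA_eq (temp : List Int) (i : Nat) (pre : List Int) (hp : pre.length = i) :
    matLoopA temp (pre ++ temp.drop i) i = pre ++ gPair (temp.drop i) := by
  subst hp
  rw [matLoopA]
  split
  case isTrue h =>
    have hd := drop_pair temp pre.length h
    have key : ∀ m2, m2 = (pre ++ pairStep (temp.getD pre.length 0) (temp.getD (pre.length + 1) 0)) ++ temp.drop (pre.length + 2) →
        matLoopA temp m2 (pre.length + 2) =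
          pre ++ gPair (temp.getD pre.length 0 :: temp.getD (pre.length + 1) 0 :: temp.drop (pre.length + 2)) := by
      intro m2 hm2
      have hlen : (pre ++ pairStep (temp.getD pre.length 0) (temp.getD (pre.length + 1) 0)).length = pre.length + 2 := by
        simp only [List.length_append, pairStep]; split <;> simp
      have hrec := matLoopA_eq temp (pre.length + 2) (pre ++ pairStep (temp.getD pre.length 0) (temp.getD (pre.length + 1) 0)) hlen
      rw [hm2, hrec]
      simp [gPair, List.append_assoc]
    simp only []
    by_cases c1 : (0:Int) ≤ temp.getD pre.length 0 ∧ (0:Int) ≤ temp.getD (pre.length + 1) 0 <;>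
      by_cases c2 : temp.getD pre.length 0 ≤ 0 ∧ temp.getD (pre.length + 1) 0 ≤ 0 <;>
      simp only [c1, c2, if_true, if_false, and_self, if_pos, if_neg, not_false_eq_true,
        ite_true, ite_false] <;>
      rw [hd] <;> apply key
    · rw [set2_append, set2_append, pairStep_eq_merge _ _ (Or.inl c1)]; simp
    · rw [set2_append, pairStep_eq_merge _ _ (Or.inl c1)]; simp
    · rw [set2_append, pairStep_eq_merge _ _ (Or.inr c2)]; simp
    · rw [pairStep_eq_keep _ _ (not_or.mpr ⟨c1, c2⟩)]; simp
  case isFalse h =>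
    have hlen : (temp.drop pre.length).length ≤ 1 := by
      have := temp.length_drop (i := pre.length); omega
    match hd : temp.drop pre.length with
    | [] => simp [gPair]
    | [x] => simp [gPair]
    | x :: y :: t => rw [hd] at hlen; simp at hlen
termination_by temp.length - i

theorem filter_erase_zero (l : List Int) (h : (0 : Int) ∈ l) :
    (l.erase 0).filter (fun x => x ≠ 0) = l.filter (fun x => x ≠ 0) := by
  induction l with
  | nil => cases h
  | cons a l ih =>
    by_cases ha : a = 0
    · subst ha; simp [List.erase_cons_head]
    · rw [List.erase_cons_tail (by simpa using ha)]
      have hl : (0 : Int) ∈ l := by cases h with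
        | head => exact absurd rfl ha
        | tail _ h => exact h
      have ih' := ih hl
      simp only [decide_not] at ih'
      simp [List.filter_cons, ha, ih']

theorem removeZeros_eq_filter (m : List Int) :
    removeZerosA m = m.filter (fun x => x ≠ 0) := by
  rw [removeZerosA]
  split
  case _ m' h =>
    have hmem : (0 : Int) ∈ m := by
      by_contra hc
      simp [(PySem.List.remove?_eq_none_iff _ _).mpr hc] at h
    rw [PySem.List.remove?_eq_some_erase m 0 hmem] at h
    cases h
    rw [removeZeros_eq_filter (m.erase 0)]
    exact filter_erase_zero m hmem
  case _ h =>
    have hmem : (0 : Int) ∉ m := (PySem.List.remove?_eq_none_iff _ _).mp h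
    rw [List.filter_eq_self.mpr]
    intro x hx
    simp only [decide_eq_true_eq]
    intro hx0; exact hmem (hx0 ▸ hx)
termination_by m.length
decreasing_by
  have hmem : (0 : Int) ∈ m := by
    by_contra hc
    simp_all [(PySem.List.remove?_eq_none_iff _ _).mpr hc]
  have h1 := List.length_erase_of_mem hmem
  have h2 : 0 < m.length := List.length_pos_of_mem hmem
  omega

theorem bLoop_eq (rest : List Int) :
    ∀ res, bLoopAlt res rest = res ++ (gPair rest).filter (fun x => x ≠ 0) := by
  match rest with
  | [] => intro res; simp [bLoopAlt, gPair]
  | [x] => intro res; by_cases hx : x = 0 <;> simp [bLoopAlt, gPair, hx]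
  | a :: b :: rest' =>
    intro res
    have ih := bLoop_eq rest'
    by_cases hmix : (0 < a ∧ b < 0) ∨ (a < 0 ∧ 0 < b)
    · have hc : ¬ ((0 ≤ a ∧ 0 ≤ b) ∨ (a ≤ 0 ∧ b ≤ 0)) := by omega
      have ha : a ≠ 0 := by omega
      have hb : b ≠ 0 := by omega
      simp [bLoopAlt, hmix, gPair, pairStep, hc, ih, ha, hb]
    · have hc : (0 ≤ a ∧ 0 ≤ b) ∨ (a ≤ 0 ∧ b ≤ 0) := by omega
      by_cases hs : a + b = 0
      · simp [bLoopAlt, hmix, hs, gPair, pairStep, hc, ih]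
      · simp [bLoopAlt, hmix, hs, gPair, pairStep, hc, ih]

-- ===== VERDICT (by name: the statement is the Claim_ definition above) =====
theorem mat_beauty_spec : Claim_equal_mat_beauty := by
  intro matrix _
  unfold Spec_mat_beauty mat_beauty mat_beauty_alt
  have h0 := matLoopA_eq matrix 0 [] rfl
  simp only [List.nil_append, List.drop_zero] at h0
  rw [h0, removeZeros_eq_filter, bLoop_eq, List.nil_append]
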